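-- pv_equiv track=rewrite | github.com/TERADA-DANTE/algorithm | python/acmicpc/solved/_2476.py | solution
-- ===== SOURCE A (Python) =====
-- def solution(n, rolls):
--     prices = [None] * n
--     for i in range(n):
--         a, b, c = rolls[i]
--         if a == b == c:
--             prices[i] = 10000+a*1000
--         elif a == b != c:
--             prices[i] = 1000+a*100
--         elif a != b == c:
--             prices[i] = 1000+b*100
--         elif a == c != b:
--             prices[i] = 1000+a*100
--         else:
--             prices[i] = sorted([a, b, c])[-1]*100
--     return max(prices)
-- ===== SOURCE B (Python) =====
-- def solution(n, rolls):
--     def prize(roll):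
--         s = sorted(roll)
--         k = (s[0] == s[1]) + (s[1] == s[2])
--         return (s[2] * 100, 1000 + s[1] * 100, 10000 + s[1] * 1000)[k]
--     return max(prize(rolls[i]) for i in range(n))
-- ===== Notes on version B (the rewrite author's own statement) =====
-- stated objective: simpler
-- what changed: Per roll, B sorts the triple to normalize it, counts adjacent equalities k in the sorted triple and selects the prize branch-free from a 3-entry tuple (s[2]*100, 1000+s[1]*100, 10000+s[1]*1000)[k], taking max over a generator, instead of A's four-way positional pairwise-equality chain writing into an index-addressed prices list.
import Mathlib
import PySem

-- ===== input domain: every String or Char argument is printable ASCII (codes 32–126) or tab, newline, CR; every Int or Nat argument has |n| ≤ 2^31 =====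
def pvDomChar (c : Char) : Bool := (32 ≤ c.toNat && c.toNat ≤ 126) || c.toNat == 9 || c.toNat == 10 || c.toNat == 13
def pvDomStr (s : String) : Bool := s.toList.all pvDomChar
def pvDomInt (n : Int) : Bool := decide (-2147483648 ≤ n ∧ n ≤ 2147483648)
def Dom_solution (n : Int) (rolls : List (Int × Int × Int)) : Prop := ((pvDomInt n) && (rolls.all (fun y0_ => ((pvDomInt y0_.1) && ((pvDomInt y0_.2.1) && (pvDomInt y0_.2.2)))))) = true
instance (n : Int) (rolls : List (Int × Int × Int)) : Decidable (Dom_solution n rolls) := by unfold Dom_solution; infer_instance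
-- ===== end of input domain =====

-- B sorts each roll, counts adjacent equalities and selects the prize from a 3-entry table,
-- replacing A's positional pairwise-equality chain over an indexed prices list (objective: simpler).

-- ===== PORT A =====
def solution (n : Int) (rolls : List (Int × Int × Int)) : Int :=
  let prices := (PySem.List.pyRange 0 n 1).map (fun i =>
    match PySem.List.pyGet? rolls i with
    | some (a, b, c) =>
      if a = b ∧ b = c then 10000 + a * 1000
      else if a = b ∧ b ≠ c then 1000 + a * 100
      else if a ≠ b ∧ b = c then 1000 + b * 100
      else if a = c ∧ c ≠ b then 1000 + a * 100
      else (PySem.List.pyGet? (PySem.List.sorted [a, b, c] (fun x => x) false) (-1)).getD 0 * 100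
    | none => 0)  -- rolls[i] raises IndexError here; excluded by Pre_solution
  (PySem.List.max? prices (fun x => x)).getD 0  -- max([]) raises ValueError; excluded by Pre_solution

-- ===== PORT B =====
-- Source B's helper 'prize': sort the roll, count adjacent equalities, table lookup
def prizeB (r : Int × Int × Int) : Int :=
  let s := PySem.List.sorted [r.1, r.2.1, r.2.2] (fun x => x) false
  let s0 := (PySem.List.pyGet? s 0).getD 0
  let s1 := (PySem.List.pyGet? s 1).getD 0
  let s2 := (PySem.List.pyGet? s 2).getD 0
  let k : Int := (if s0 = s1 then 1 else 0) + (if s1 = s2 then 1 else 0)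
  (PySem.List.pyGet? [s2 * 100, 1000 + s1 * 100, 10000 + s1 * 1000] k).getD 0

def solution_alt (n : Int) (rolls : List (Int × Int × Int)) : Int :=
  (PySem.List.max? ((PySem.List.pyRange 0 n 1).map (fun i =>
    match PySem.List.pyGet? rolls i with
    | some r => prizeB r   -- prize(rolls[i])
    | none => 0)) (fun x => x)).getD 0
  -- rolls[i] raises IndexError / max(empty) raises ValueError; excluded by Pre_solution

-- ===== PRECONDITION & SPEC =====
-- Pre_ excludes exactly the inputs where A raises: n < 1 (max of an empty prices list → ValueError)
-- and n > len(rolls) (rolls[i] → IndexError).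
def Pre_solution (n : Int) (rolls : List (Int × Int × Int)) : Prop := 1 ≤ n ∧ n ≤ rolls.length
instance (n : Int) (rolls : List (Int × Int × Int)) : Decidable (Pre_solution n rolls) := by unfold Pre_solution; infer_instance
def pvWitness_solution : Int × (List (Int × Int × Int)) := (2, [(1, 1, 1), (2, 3, 4)])
def Spec_solution (n : Int) (rolls : List (Int × Int × Int)) (out : Int) : Prop := out = solution_alt n rolls
instance (n : Int) (rolls : List (Int × Int × Int)) (out : Int) : Decidable (Spec_solution n rolls out) := by unfold Spec_solution; infer_instance

-- ===== CLAIM (what is proved, stated in full; the proofs are below) =====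
def Claim_equal_solution : Prop := ∀ (n : Int) (rolls : List (Int × Int × Int)), Dom_solution n rolls → Pre_solution n rolls → Spec_solution n rolls (solution n rolls)

-- ===== LEMMAS AND PROOFS =====

theorem prizeB_of_sorted (a b c x y z : Int)
    (hs : PySem.List.sorted [a,b,c] (fun t => t) false = [x,y,z]) :
    prizeB (a,b,c) = if x = y then (if y = z then 10000 + y * 1000 else 1000 + y * 100)
      else (if y = z then 1000 + y * 100 else z * 100) := by
  simp only [prizeB, hs]
  split_ifs <;> simp_all [PySem.List.pyGet?, PySem.List.pyIdx?]

def prizeA (r : Int × Int × Int) : Int :=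
  match r with
  | (a, b, c) =>
    if a = b ∧ b = c then 10000 + a * 1000
    else if a = b ∧ b ≠ c then 1000 + a * 100
    else if a ≠ b ∧ b = c then 1000 + b * 100
    else if a = c ∧ c ≠ b then 1000 + a * 100
    else (PySem.List.pyGet? (PySem.List.sorted [a, b, c] (fun x => x) false) (-1)).getD 0 * 100

theorem pcase0 (a b c : Int) (hxy : a ≤ b) (hyz : b ≤ c) : prizeA (a,b,c) = prizeB (a,b,c) := by
  have hs := PySem.List.sorted_id_eq_of_perm_of_pairwise [a,b,c] [a,b,c] (List.Perm.refl _) (by simp; omega)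
  rw [prizeB_of_sorted a b c _ _ _ hs]
  simp only [prizeA, hs, PySem.List.pyGet?_neg_one, List.getLast?_cons_cons, List.getLast?_singleton, Option.getD_some]
  split_ifs <;> omega

theorem pcase1 (a b c : Int) (hxy : a ≤ c) (hyz : c ≤ b) : prizeA (a,b,c) = prizeB (a,b,c) := by
  have hs := PySem.List.sorted_id_eq_of_perm_of_pairwise [a,b,c] [a,c,b] ((List.Perm.swap b c []).cons a) (by simp; omega)
  rw [prizeB_of_sorted a b c _ _ _ hs]
  simp only [prizeA, hs, PySem.List.pyGet?_neg_one, List.getLast?_cons_cons, List.getLast?_singleton, Option.getD_some]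
  split_ifs <;> omega

theorem pcase2 (a b c : Int) (hxy : b ≤ a) (hyz : a ≤ c) : prizeA (a,b,c) = prizeB (a,b,c) := by
  have hs := PySem.List.sorted_id_eq_of_perm_of_pairwise [a,b,c] [b,a,c] (List.Perm.swap a b [c]) (by simp; omega)
  rw [prizeB_of_sorted a b c _ _ _ hs]
  simp only [prizeA, hs, PySem.List.pyGet?_neg_one, List.getLast?_cons_cons, List.getLast?_singleton, Option.getD_some]
  split_ifs <;> omega

theorem pcase3 (a b c : Int) (hxy : b ≤ c) (hyz : c ≤ a) : prizeA (a,b,c) = prizeB (a,b,c) := by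
  have hs := PySem.List.sorted_id_eq_of_perm_of_pairwise [a,b,c] [b,c,a] (((List.Perm.swap a c []).cons b).trans (List.Perm.swap a b [c])) (by simp; omega)
  rw [prizeB_of_sorted a b c _ _ _ hs]
  simp only [prizeA, hs, PySem.List.pyGet?_neg_one, List.getLast?_cons_cons, List.getLast?_singleton, Option.getD_some]
  split_ifs <;> omega

theorem pcase4 (a b c : Int) (hxy : c ≤ a) (hyz : a ≤ b) : prizeA (a,b,c) = prizeB (a,b,c) := by
  have hs := PySem.List.sorted_id_eq_of_perm_of_pairwise [a,b,c] [c,a,b] ((List.Perm.swap a c [b]).trans ((List.Perm.swap b c []).cons a)) (by simp; omega)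
  rw [prizeB_of_sorted a b c _ _ _ hs]
  simp only [prizeA, hs, PySem.List.pyGet?_neg_one, List.getLast?_cons_cons, List.getLast?_singleton, Option.getD_some]
  split_ifs <;> omega

theorem pcase5 (a b c : Int) (hxy : c ≤ b) (hyz : b ≤ a) : prizeA (a,b,c) = prizeB (a,b,c) := by
  have hs := PySem.List.sorted_id_eq_of_perm_of_pairwise [a,b,c] [c,b,a] ((List.Perm.swap b c [a]).trans (((List.Perm.swap a c []).cons b).trans (List.Perm.swap a b [c]))) (by simp; omega)
  rw [prizeB_of_sorted a b c _ _ _ hs]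
  simp only [prizeA, hs, PySem.List.pyGet?_neg_one, List.getLast?_cons_cons, List.getLast?_singleton, Option.getD_some]
  split_ifs <;> omega

theorem prize_eq (r : Int × Int × Int) : prizeA r = prizeB r := by
  obtain ⟨a, b, c⟩ := r
  rcases le_total a b with h1 | h1 <;> rcases le_total b c with h2 | h2 <;> rcases le_total a c with h3 | h3
  · exact pcase0 a b c h1 h2
  · exact pcase0 a b c h1 h2
  · exact pcase1 a b c h3 h2
  · exact pcase4 a b c h3 h1
  · exact pcase2 a b c h1 h3
  · exact pcase3 a b c h2 h3
  · exact pcase5 a b c h2 h1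
  · exact pcase5 a b c h2 h1

-- ===== VERDICT (by name: the statement is the Claim_ definition above) =====
theorem solution_spec : Claim_equal_solution := by
  intro n rolls hdom hpre
  obtain ⟨hn1, hn2⟩ := hpre
  obtain ⟨N, rfl⟩ : ∃ N : Nat, n = (N : Int) := ⟨n.toNat, (Int.toNat_of_nonneg (by omega)).symm⟩
  unfold Spec_solution solution solution_alt
  have hNlen : N ≤ rolls.length := by exact_mod_cast hn2
  have hprices : (PySem.List.pyRange 0 (N : Int) 1).map (fun i =>
      match PySem.List.pyGet? rolls i with
      | some (a, b, c) =>
        if a = b ∧ b = c then 10000 + a * 1000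
        else if a = b ∧ b ≠ c then 1000 + a * 100
        else if a ≠ b ∧ b = c then 1000 + b * 100
        else if a = c ∧ c ≠ b then 1000 + a * 100
        else (PySem.List.pyGet? (PySem.List.sorted [a, b, c] (fun x => x) false) (-1)).getD 0 * 100
      | none => 0) = (rolls.take N).map prizeA := by
    apply List.ext_getElem
    · simp [PySem.List.length_pyRange_one]; omega
    · intro i hi1 hi2
      have hiN : i < N := by simpa [PySem.List.length_pyRange_one] using hi1
      have hilen : i < rolls.length := lt_of_lt_of_le hiN hNlen
      simp only [List.getElem_map, PySem.List.getElem_pyRange_one, List.getElem_take]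
      have : (0 : Int) + (i : Int) = ((i : Nat) : Int) := by omega
      rw [this, PySem.List.pyGet?_natCast, List.getElem?_eq_getElem hilen]
      obtain ⟨a, b, c⟩ := rolls[i]
      rfl
  have hpricesB : (PySem.List.pyRange 0 (N : Int) 1).map (fun i =>
      match PySem.List.pyGet? rolls i with
      | some r => prizeB r
      | none => 0) = (rolls.take N).map prizeB := by
    apply List.ext_getElem
    · simp [PySem.List.length_pyRange_one]; omega
    · intro i hi1 hi2
      have hiN : i < N := by simpa [PySem.List.length_pyRange_one] using hi1
      have hilen : i < rolls.length := lt_of_lt_of_le hiN hNlen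
      simp only [List.getElem_map, PySem.List.getElem_pyRange_one, List.getElem_take]
      have : (0 : Int) + (i : Int) = ((i : Nat) : Int) := by omega
      rw [this, PySem.List.pyGet?_natCast, List.getElem?_eq_getElem hilen]
  have hfun : prizeA = prizeB := funext prize_eq
  rw [hprices, hpricesB, hfun]
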